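-- pv_equiv track=rewrite | github.com/ryul99/algorithm-study | Python/boj/boj15652.py | incr
-- ===== SOURCE A (Python) =====
-- def incr(l, n):
--     if len(l) == 1:
--         l[0] += 1
--         return l
--     for i in range(len(l) - 1, -1, -1):
--         if l[i] < n:
--             l[i] += 1
--             return l
--         l_sub = incr(l[:-1], n)
--         l = l_sub + [l_sub[-1]]
--         return l
--     return l
-- ===== SOURCE B (Python) =====
-- def incr(l, n):
--     if len(l) == 1:
--         l[0] += 1
--         return l
--     if not l:
--         return l
--     if l[-1] < n:
--         l[-1] += 1
--         return l
--     # carry case: find the rightmost index i < len(l)-1 with l[i] < n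
--     # (or i == 0, which is incremented unconditionally), then fill from i
--     i = len(l) - 2
--     while i > 0 and l[i] >= n:
--         i -= 1
--     v = l[i] + 1
--     return l[:i] + [v] * (len(l) - i)
-- ===== Notes on version B (the rewrite author's own statement) =====
-- stated objective: faster
-- what changed: Replaces A's recursion on l[:-1] (one prefix copy per carry level) by a single iterative right-to-left scan that finds the rightmost incrementable position and builds the result in one concatenation.
import Mathlib
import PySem

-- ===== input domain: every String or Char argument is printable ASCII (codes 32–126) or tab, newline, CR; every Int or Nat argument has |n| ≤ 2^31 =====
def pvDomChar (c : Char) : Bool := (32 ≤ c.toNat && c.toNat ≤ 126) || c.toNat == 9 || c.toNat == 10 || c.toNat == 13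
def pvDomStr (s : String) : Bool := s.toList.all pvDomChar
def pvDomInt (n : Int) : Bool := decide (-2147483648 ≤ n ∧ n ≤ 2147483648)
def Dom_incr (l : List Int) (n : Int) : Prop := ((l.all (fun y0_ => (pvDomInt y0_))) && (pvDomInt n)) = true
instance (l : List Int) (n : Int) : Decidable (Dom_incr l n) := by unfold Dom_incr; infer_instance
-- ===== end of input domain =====

-- B replaces A's recursion on l[:-1] (which copies a prefix at every carry level) by a single
-- right-to-left index scan that builds the result once; equivalence is about the RETURN value
-- (both mutate l in place only in the len==1 and l[-1]<n branches, and build a fresh list otherwise).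


-- ===== PORT A =====
-- Literal port of A.  `l[i]` with i = len(l)-1 on a nonempty list is the last element
-- (ported as getLastD 0, exact since the list is nonempty there); `l[:-1]` is dropLast;
-- the for-loop runs at most its first iteration (every branch returns), so it is the
-- if/else below, and the final `return l` is the empty-list case (empty range).
def incr (l : List Int) (n : Int) : List Int :=
  if h1 : l.length = 1 then
    match l with
    | [x] => [x + 1]        -- l[0] += 1; return l
    | _ => l
  else if _h0 : l.length = 0 then l
  else
    if l.getLastD 0 < n then
      l.dropLast ++ [l.getLastD 0 + 1]          -- l[i] += 1; return l
    else
      let ls := incr l.dropLast n               -- l_sub = incr(l[:-1], n)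
      ls ++ [ls.getLastD 0]                     -- l = l_sub + [l_sub[-1]]  (l_sub nonempty here)
termination_by l.length
decreasing_by simp [List.length_dropLast]; omega

-- ===== PORT B =====
-- the `while i > 0 and l[i] >= n: i -= 1` loop of Source B, as recursion on the index i
def scanIdx (l : List Int) (n : Int) : Nat → Nat
  | 0 => 0
  | i + 1 => if l.getD (i + 1) 0 < n then i + 1 else scanIdx l n i

def incr_alt (l : List Int) (n : Int) : List Int :=
  if l.length = 1 then
    [l.getD 0 0 + 1]        -- l[0] += 1; return l  (len == 1, so the result is [l[0]+1])
  else if l.length = 0 then l                   -- if not l: return l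
  else if l.getLastD 0 < n then
    l.dropLast ++ [l.getLastD 0 + 1]            -- l[-1] += 1; return l
  else
    let i := scanIdx l n (l.length - 2)         -- the while loop
    l.take i ++ List.replicate (l.length - i) (l.getD i 0 + 1)   -- l[:i] + [v]*(len(l)-i)

-- ===== PRECONDITION & SPEC =====
def Spec_incr (l : List Int) (n : Int) (out : List Int) : Prop := out = incr_alt l n
instance (l : List Int) (n : Int) (out : List Int) : Decidable (Spec_incr l n out) := by unfold Spec_incr; infer_instance

-- ===== CLAIM (what is proved, stated in full; the proofs are below) =====
def Claim_equal_incr : Prop := ∀ (l : List Int) (n : Int), Dom_incr l n → Spec_incr l n (incr l n)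

-- ===== LEMMAS AND PROOFS =====

theorem scanIdx_le (l : List Int) (n : Int) (i : Nat) : scanIdx l n i ≤ i := by
  induction i with
  | zero => simp [scanIdx]
  | succ i ih =>
      simp only [scanIdx]
      split
      · exact le_refl _
      · exact Nat.le_succ_of_le ih

theorem scanIdx_append (l : List Int) (a n : Int) (i : Nat) (h : i < l.length) :
    scanIdx (l ++ [a]) n i = scanIdx l n i := by
  induction i with
  | zero => simp [scanIdx]
  | succ i ih =>
      simp only [scanIdx, List.getD_append _ _ _ _ h]
      split
      · rfl
      · exact ih (Nat.lt_of_succ_lt h)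

theorem getLastD_replicate (k : Nat) (v d : Int) (hk : 0 < k) :
    (List.replicate k v).getLastD d = v := by
  cases k with
  | zero => omega
  | succ k =>
      rw [List.replicate_succ']
      simp

theorem getD_last (l : List Int) (d : Int) : l.getD (l.length - 1) d = l.getLastD d := by
  rw [List.getLastD_eq_getLast?, List.getLast?_eq_getElem?]
  simp [List.getD]

theorem getLastD_append_ne_nil (xs ys : List Int) (d : Int) (h : ys ≠ []) :
    (xs ++ ys).getLastD d = ys.getLastD d := by
  simp [List.getLastD_eq_getLast?, List.getLast?_append]
  cases hys : ys.getLast? with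
  | none => exact absurd (List.getLast?_eq_none_iff.mp hys) h
  | some v => simp

-- the key step: appending an element a ≥ n carries, and B's carry result is
-- B's result on the prefix extended with its own last element
theorem incr_alt_append (l : List Int) (a n : Int) (hl : l ≠ []) (ha : n ≤ a) :
    incr_alt (l ++ [a]) n = incr_alt l n ++ [(incr_alt l n).getLastD 0] := by
  have hL : 1 ≤ l.length := List.length_pos_iff.mpr hl
  have hlast : (l ++ [a]).getLastD 0 = a := by simp
  have hlen : (l ++ [a]).length = l.length + 1 := by simp
  rcases Nat.lt_or_ge l.length 2 with h1 | h2
  · -- l = [x]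
    obtain ⟨x, rfl⟩ : ∃ x, l = [x] := by
      cases l with
      | nil => simp at hL
      | cons y ys => cases ys with
        | nil => exact ⟨y, rfl⟩
        | cons z zs => simp at h1
    simp only [incr_alt, List.cons_append, List.nil_append]
    norm_num [hlast, scanIdx]
    rw [if_neg (not_lt.mpr ha)]
    simp [List.replicate]
  · -- l.length ≥ 2
    have hne1 : ¬ (l ++ [a]).length = 1 := by omega
    have hne0 : ¬ (l ++ [a]).length = 0 := by omega
    have hnot : ¬ (l ++ [a]).getLastD 0 < n := by rw [hlast]; omega
    rw [incr_alt.eq_def]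
    simp only [hnot, if_false, hlen]
    rw [if_neg (by omega), if_neg (by omega)]
    have hidx : l.length + 1 - 2 = (l.length - 2) + 1 := by omega
    have hgetlast : (l ++ [a]).getD (l.length - 2 + 1) 0 = l.getLastD 0 := by
      rw [List.getD_append _ _ _ _ (by omega), show l.length - 2 + 1 = l.length - 1 by omega,
        getD_last]
    by_cases hb : l.getLastD 0 < n
    · -- prefix's last element absorbs the carry
      have hscan : scanIdx (l ++ [a]) n (l.length + 1 - 2) = l.length - 1 := by
        rw [hidx]; simp only [scanIdx, hgetlast, if_pos hb]; omega
      rw [hscan]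
      have hrhs : incr_alt l n = l.dropLast ++ [l.getLastD 0 + 1] := by
        rw [incr_alt.eq_def]; rw [if_neg (by omega), if_neg (by omega), if_pos hb]
      rw [hrhs, getLastD_append_ne_nil _ _ _ (by simp)]
      rw [List.take_append_of_le_length (by omega)]
      rw [List.getD_append _ _ _ _ (by omega), getD_last]
      rw [show l.length + 1 - (l.length - 1) = 2 by omega]
      simp [List.dropLast_eq_take, List.replicate, List.getLastD]
    · -- the carry propagates into the prefix: both sides scan the same indices
      have hscan : scanIdx (l ++ [a]) n (l.length + 1 - 2) = scanIdx l n (l.length - 2) := by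
        rw [hidx]; simp only [scanIdx, hgetlast, if_neg hb]
        exact scanIdx_append _ _ _ _ (by have := scanIdx_le l n (l.length - 2); omega)
      rw [hscan]
      set j := scanIdx l n (l.length - 2) with hj
      have hjle : j ≤ l.length - 2 := scanIdx_le l n (l.length - 2)
      have hrhs : incr_alt l n =
          l.take j ++ List.replicate (l.length - j) (l.getD j 0 + 1) := by
        rw [incr_alt.eq_def]; rw [if_neg (by omega), if_neg (by omega), if_neg hb]
      rw [hrhs, getLastD_append_ne_nil _ _ _ (by simp; omega),
        getLastD_replicate _ _ _ (by omega)]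
      rw [List.take_append_of_le_length (by omega)]
      rw [List.getD_append _ _ _ _ (by omega)]
      rw [List.append_assoc, ← List.replicate_succ']
      rw [show l.length - j + 1 = l.length + 1 - j by omega]

theorem incr_eq_alt (l : List Int) (n : Int) : incr l n = incr_alt l n := by
  induction l using List.reverseRecOn with
  | nil => simp [incr, incr_alt]
  | append_singleton l a ih =>
      cases l with
      | nil =>
          rw [incr.eq_def, incr_alt.eq_def]
          norm_num
          rfl
      | cons y ys =>
        have hL : 1 ≤ (y :: ys).length := by simp
        have hlen : ((y :: ys) ++ [a]).length = (y :: ys).length + 1 := by simp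
        by_cases hc : ((y :: ys) ++ [a]).getLastD 0 < n
        · rw [incr.eq_def, incr_alt.eq_def]
          rw [dif_neg (by omega), dif_neg (by omega), if_pos hc]
          rw [if_neg (by omega), if_neg (by omega), if_pos hc]
        · rw [incr.eq_def]
          rw [dif_neg (by omega), dif_neg (by omega), if_neg hc]
          rw [List.dropLast_concat, ih]
          exact (incr_alt_append (y :: ys) a n (by simp) (by rw [List.getLastD_concat] at hc; omega)).symm

-- ===== VERDICT (by name: the statement is the Claim_ definition above) =====
theorem incr_spec : Claim_equal_incr := by
  intro l n _
  unfold Spec_incr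
  exact incr_eq_alt l n
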